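-- pv_equiv track=rewrite | github.com/Jaeboong/hearbe | AI/api/ws/tts/tts_english_korean.py | _parse_onset
-- ===== SOURCE A (Python) =====
-- from typing import Dict, Tuple, Optional
--
-- def _parse_onset(word: str, index: int) -> Tuple[str, int]:
--     for token in ("sch", "ch", "sh", "th", "ph", "wh", "ng", "kk", "pp", "tt", "ss", "jj"):
--         if word.startswith(token, index):
--             return token, len(token)
--     ch = word[index]
--     if ch == "c":
--         nxt = word[index + 1:index + 2]
--         if nxt in ("e", "i", "y"):
--             return "s", 1
--     if ch == "g":
--         nxt = word[index + 1:index + 2]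
--         if nxt in ("e", "i", "y"):
--             return "j", 1
--     return ch, 1
-- ===== SOURCE B (Python) =====
-- _TOKENS = ("sch", "ch", "sh", "th", "ph", "wh", "ng", "kk", "pp", "tt", "ss", "jj")
--
--
-- def _parse_onset(word, index):
--     # Character-driven longest-match: walk the tail one character at a time,
--     # pruning the set of still-viable tokens and recording the longest one
--     # completed so far (the unique longest match equals A's first match).
--     tail = word[index:]
--     cands = list(_TOKENS)
--     k = 0
--     best = 0
--     for c in tail:
--         cands = [t for t in cands if k < len(t) and t[k] == c]
--         if not cands:
--             break
--         k += 1
--         if any(len(t) == k for t in cands):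
--             best = k
--     if best:
--         return tail[:best], best
--     ch = word[index]
--     nxt = word[index + 1:index + 2]
--     if ch in "cg" and nxt in ("e", "i", "y"):
--         return ("s" if ch == "c" else "j"), 1
--     return ch, 1
-- ===== Notes on version B (the rewrite author's own statement) =====
-- stated objective: alternative
-- what changed: Replaces A's token-by-token prefix-scan over the 12-tuple with a character-driven longest-match: B walks the tail one character at a time, pruning the list of still-viable tokens at each position and recording the longest token completed so far (unique, so longest match equals A's first match); the duplicated c/g branches are merged.
import Mathlib
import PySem

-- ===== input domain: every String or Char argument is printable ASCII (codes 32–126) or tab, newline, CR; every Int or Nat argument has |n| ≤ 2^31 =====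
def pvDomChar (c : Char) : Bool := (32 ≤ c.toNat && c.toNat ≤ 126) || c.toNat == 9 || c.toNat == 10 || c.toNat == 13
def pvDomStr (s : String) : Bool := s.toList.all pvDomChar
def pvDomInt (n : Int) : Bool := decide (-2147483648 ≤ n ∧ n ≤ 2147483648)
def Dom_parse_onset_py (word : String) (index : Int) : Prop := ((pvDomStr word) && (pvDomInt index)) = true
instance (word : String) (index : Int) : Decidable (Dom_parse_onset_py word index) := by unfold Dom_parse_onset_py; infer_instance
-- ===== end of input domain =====

set_option maxRecDepth 4000
set_option maxHeartbeats 1000000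


-- B replaces A's token-by-token prefix scan by a character-driven longest-match pass that prunes
-- the list of still-viable tokens at each position (alternative decomposition; same cost).

-- ===== PORT A =====
def pyStartswithFrom (word token : String) (index : Int) : Bool :=
  token.toList.isPrefixOf (PySem.List.slice word.toList (some index) none)

def onsetTokens : List String := ["sch", "ch", "sh", "th", "ph", "wh", "ng", "kk", "pp", "tt", "ss", "jj"]

def onsetScan (word : String) (index : Int) : List String → Option (String × Int)
  | [] => none
  | t :: ts =>
    if pyStartswithFrom word t index then some (t, (t.toList.length : Int))
    else onsetScan word index ts

def parse_onset_py (word : String) (index : Int) : String × Int :=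
  match onsetScan word index onsetTokens with
  | some r => r
  | none =>
    match PySem.Str.pyGet? word index with
    | none => ("", 0)
    | some ch =>
      let nxt := PySem.Str.slice word (some (index + 1)) (some (index + 2))
      if ch == 'c' && (nxt == "e" || nxt == "i" || nxt == "y") then ("s", 1)
      else if ch == 'g' && (nxt == "e" || nxt == "i" || nxt == "y") then ("j", 1)
      else (String.singleton ch, 1)

-- ===== PORT B =====
def pvTokens : List (List Char) :=
  [['s','c','h'], ['c','h'], ['s','h'], ['t','h'], ['p','h'], ['w','h'],
   ['n','g'], ['k','k'], ['p','p'], ['t','t'], ['s','s'], ['j','j']]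

-- the pruning loop of Source B: walk the characters, filter the viable tokens, remember the
-- longest completed token length
def onsetPrune : List Char → List (List Char) → Nat → Nat → Nat
  | [], _, _, best => best
  | c :: cs, cands, k, best =>
    let cands' := cands.filter (fun t => decide (k < t.length) && (t.getD k ' ' == c))
    if cands'.isEmpty then best
    else
      onsetPrune cs cands' (k + 1)
        (if cands'.any (fun t => t.length == k + 1) then k + 1 else best)

def parse_onset_py_alt (word : String) (index : Int) : String × Int :=
  let tail := PySem.Str.slice word (some index) none
  let best := onsetPrune tail.toList pvTokens 0 0
  if best ≠ 0 then (PySem.Str.slice tail none (some (best : Int)), (best : Int))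
  else
    match PySem.Str.pyGet? word index with
    | none => ("", 0)
    | some ch =>
      let nxt := PySem.Str.slice word (some (index + 1)) (some (index + 2))
      if (ch == 'c' || ch == 'g') && (nxt == "e" || nxt == "i" || nxt == "y") then
        ((if ch == 'c' then "s" else "j"), 1)
      else (String.singleton ch, 1)

-- ===== PRECONDITION & SPEC =====
-- Exactly the inputs on which Python A returns; on all others word[index] raises IndexError:
-- either index is a valid (possibly negative) position of word, or index lies below -len(word)
-- (startswith then clamps the start to 0) and word itself begins with one of the onset tokens.
def Pre_parse_onset_py (word : String) (index : Int) : Prop :=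
  PySem.Raise.InRange word.toList.length index ∨
    (index + (word.toList.length : Int) < 0 ∧
      (["sch", "ch", "sh", "th", "ph", "wh", "ng", "kk", "pp", "tt", "ss", "jj"] : List String).any
        (fun t => t.toList.isPrefixOf word.toList) = true)
instance (word : String) (index : Int) : Decidable (Pre_parse_onset_py word index) := by
  unfold Pre_parse_onset_py; infer_instance

def pvWitness_parse_onset_py : String × Int := ("church", 0)

def Spec_parse_onset_py (word : String) (index : Int) (out : String × Int) : Prop :=
  out = parse_onset_py_alt word index
instance (word : String) (index : Int) (out : String × Int) : Decidable (Spec_parse_onset_py word index out) := by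
  unfold Spec_parse_onset_py; infer_instance

-- ===== CLAIM (what is proved, stated in full; the proofs are below) =====
def Claim_equal_parse_onset_py : Prop := ∀ (word : String) (index : Int), Dom_parse_onset_py word index → Pre_parse_onset_py word index → Spec_parse_onset_py word index (parse_onset_py word index)

-- ===== LEMMAS AND PROOFS =====
theorem str_eq_iff_toList {a b : String} : a = b ↔ a.toList = b.toList :=
  ⟨fun h => h ▸ rfl, String.ext⟩

theorem prune_done (rest : List Char) (cands : List (List Char)) (k best : Nat)
    (h : ∀ t ∈ cands, t.length ≤ k) : onsetPrune rest cands k best = best := by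
  cases rest with
  | nil => rfl
  | cons c cs =>
    have hf : cands.filter (fun t => decide (k < t.length) && (t.getD k ' ' == c)) = [] := by
      refine List.filter_eq_nil_iff.mpr (fun t ht => ?_)
      have := h t ht
      simp [Nat.not_lt.mpr this]
    simp only [onsetPrune, hf]
    simp

theorem prune_one (x : Char) (t : List Char) (rest : List Char) (k best : Nat)
    (ht : t.length = k + 1) (hx : t.getD k ' ' = x) :
    onsetPrune rest [t] k best = if rest.take 1 = [x] then k + 1 else best := by
  have hk : k < t.length := by omega
  have hget : t[k] = x := by
    rw [List.getD_eq_getElem t ' ' hk] at hx; exact hx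
  cases rest with
  | nil => simp [onsetPrune]
  | cons c cs =>
    by_cases hc : c = x
    · subst hc
      have hf : ([t] : List (List Char)).filter
          (fun u => decide (k < u.length) && (u.getD k ' ' == c)) = [t] := by
        simp [List.filter, hk, hget]
      simp only [onsetPrune, hf]
      have hd : onsetPrune cs [t] (k + 1) (k + 1) = k + 1 :=
        prune_done cs [t] (k + 1) (k + 1) (by simp [ht])
      simp [ht, hd, List.take]
    · have hf : ([t] : List (List Char)).filter
          (fun u => decide (k < u.length) && (u.getD k ' ' == c)) = [] := by
        have hb : (x == c) = false := by
          simp only [beq_eq_false_iff_ne]; intro h; exact absurd h.symm hc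
        simp [List.filter, hk, hget, hb]
      simp only [onsetPrune, hf]
      simp [List.take, hc]
def pv2 : List (List Char) :=
  [['c','h'], ['s','h'], ['t','h'], ['p','h'], ['w','h'],
   ['n','g'], ['k','k'], ['p','p'], ['t','t'], ['s','s'], ['j','j']]
def pvBest (T : List Char) : Nat :=
  if T.take 3 = ['s','c','h'] then 3
  else if T.take 2 ∈ pv2 then 2 else 0

theorem prune_stop (c : Char) (cs : List Char) (cands : List (List Char)) (k best : Nat)
    (h : ∀ t ∈ cands, ¬(k < t.length ∧ t.getD k ' ' = c)) :
    onsetPrune (c :: cs) cands k best = best := by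
  have hf : cands.filter (fun t => decide (k < t.length) && (t.getD k ' ' == c)) = [] :=
    List.filter_eq_nil_iff.mpr (fun t ht => by simpa using h t ht)
  simp only [onsetPrune, hf]
  simp

theorem prune_spec (T : List Char) : onsetPrune T pvTokens 0 0 = pvBest T := by
  cases T with
  | nil => decide
  | cons a rest0 =>
    have haclass : a = 's' ∨ a = 'c' ∨ a = 't' ∨ a = 'p' ∨ a = 'w' ∨ a = 'n' ∨ a = 'k' ∨ a = 'j' ∨
        (¬a = 's' ∧ ¬a = 'c' ∧ ¬a = 't' ∧ ¬a = 'p' ∧ ¬a = 'w' ∧ ¬a = 'n' ∧ ¬a = 'k' ∧ ¬a = 'j') := by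
      tauto
    rcases haclass with rfl | rfl | rfl | rfl | rfl | rfl | rfl | rfl | hrest
    · rw [show onsetPrune ('s'::rest0) pvTokens 0 0
            = onsetPrune rest0 [['s','c','h'],['s','h'],['s','s']] 1 0 from rfl]
      cases rest0 with
      | nil => decide
      | cons b rest1 =>
        have hbclass : b = 'c' ∨ b = 'h' ∨ b = 's' ∨ (¬b = 'c' ∧ ¬b = 'h' ∧ ¬b = 's') := by tauto
        rcases hbclass with rfl | rfl | rfl | ⟨hb1, hb2, hb3⟩
        · rw [show onsetPrune ('c'::rest1) [['s','c','h'],['s','h'],['s','s']] 1 0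
                = onsetPrune rest1 [['s','c','h']] 2 0 from rfl]
          rw [prune_one 'h' ['s','c','h'] rest1 2 0 rfl rfl]
          by_cases hr : rest1.take 1 = ['h']
          · simp [pvBest, hr]
          · simp [pvBest, hr, pv2]
        · rw [show onsetPrune ('h'::rest1) [['s','c','h'],['s','h'],['s','s']] 1 0
                = onsetPrune rest1 [['s','h']] 2 2 from rfl]
          rw [prune_done rest1 [['s','h']] 2 2 (by decide)]
          simp [pvBest, pv2]
        · rw [show onsetPrune ('s'::rest1) [['s','c','h'],['s','h'],['s','s']] 1 0
                = onsetPrune rest1 [['s','s']] 2 2 from rfl]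
          rw [prune_done rest1 [['s','s']] 2 2 (by decide)]
          simp [pvBest, pv2]
        · rw [prune_stop b rest1 [['s','c','h'],['s','h'],['s','s']] 1 0
                (by intro t ht; fin_cases ht <;> simp <;> (intro h; subst h; simp_all))]
          simp [pvBest, pv2, hb1, hb2, hb3]
    · rw [show onsetPrune ('c'::rest0) pvTokens 0 0
            = onsetPrune rest0 [['c','h']] 1 0 from rfl]
      rw [prune_one 'h' ['c','h'] rest0 1 0 rfl rfl]
      by_cases hr : rest0.take 1 = ['h']
      · simp [pvBest, hr, pv2]
      · simp [pvBest, hr, pv2]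
    · rw [show onsetPrune ('t'::rest0) pvTokens 0 0
            = onsetPrune rest0 [['t','h'],['t','t']] 1 0 from rfl]
      cases rest0 with
      | nil => decide
      | cons b rest1 =>
        have hbclass : b = 'h' ∨ b = 't' ∨ (¬b = 'h' ∧ ¬b = 't') := by tauto
        rcases hbclass with rfl | rfl | ⟨hb1, hb2⟩
        · rw [show onsetPrune ('h'::rest1) [['t','h'],['t','t']] 1 0
                = onsetPrune rest1 [['t','h']] 2 2 from rfl]
          rw [prune_done rest1 [['t','h']] 2 2 (by decide)]
          simp [pvBest, pv2]
        · rw [show onsetPrune ('t'::rest1) [['t','h'],['t','t']] 1 0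
                = onsetPrune rest1 [['t','t']] 2 2 from rfl]
          rw [prune_done rest1 [['t','t']] 2 2 (by decide)]
          simp [pvBest, pv2]
        · rw [prune_stop b rest1 [['t','h'],['t','t']] 1 0
                (by intro t ht; fin_cases ht <;> simp <;> (intro h; subst h; simp_all))]
          simp [pvBest, pv2, hb1, hb2]
    · rw [show onsetPrune ('p'::rest0) pvTokens 0 0
            = onsetPrune rest0 [['p','h'],['p','p']] 1 0 from rfl]
      cases rest0 with
      | nil => decide
      | cons b rest1 =>
        have hbclass : b = 'h' ∨ b = 'p' ∨ (¬b = 'h' ∧ ¬b = 'p') := by tauto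
        rcases hbclass with rfl | rfl | ⟨hb1, hb2⟩
        · rw [show onsetPrune ('h'::rest1) [['p','h'],['p','p']] 1 0
                = onsetPrune rest1 [['p','h']] 2 2 from rfl]
          rw [prune_done rest1 [['p','h']] 2 2 (by decide)]
          simp [pvBest, pv2]
        · rw [show onsetPrune ('p'::rest1) [['p','h'],['p','p']] 1 0
                = onsetPrune rest1 [['p','p']] 2 2 from rfl]
          rw [prune_done rest1 [['p','p']] 2 2 (by decide)]
          simp [pvBest, pv2]
        · rw [prune_stop b rest1 [['p','h'],['p','p']] 1 0
                (by intro t ht; fin_cases ht <;> simp <;> (intro h; subst h; simp_all))]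
          simp [pvBest, pv2, hb1, hb2]
    · rw [show onsetPrune ('w'::rest0) pvTokens 0 0
            = onsetPrune rest0 [['w','h']] 1 0 from rfl]
      rw [prune_one 'h' ['w','h'] rest0 1 0 rfl rfl]
      by_cases hr : rest0.take 1 = ['h']
      · simp [pvBest, hr, pv2]
      · simp [pvBest, hr, pv2]
    · rw [show onsetPrune ('n'::rest0) pvTokens 0 0
            = onsetPrune rest0 [['n','g']] 1 0 from rfl]
      rw [prune_one 'g' ['n','g'] rest0 1 0 rfl rfl]
      by_cases hr : rest0.take 1 = ['g']
      · simp [pvBest, hr, pv2]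
      · simp [pvBest, hr, pv2]
    · rw [show onsetPrune ('k'::rest0) pvTokens 0 0
            = onsetPrune rest0 [['k','k']] 1 0 from rfl]
      rw [prune_one 'k' ['k','k'] rest0 1 0 rfl rfl]
      by_cases hr : rest0.take 1 = ['k']
      · simp [pvBest, hr, pv2]
      · simp [pvBest, hr, pv2]
    · rw [show onsetPrune ('j'::rest0) pvTokens 0 0
            = onsetPrune rest0 [['j','j']] 1 0 from rfl]
      rw [prune_one 'j' ['j','j'] rest0 1 0 rfl rfl]
      by_cases hr : rest0.take 1 = ['j']
      · simp [pvBest, hr, pv2]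
      · simp [pvBest, hr, pv2]
    · obtain ⟨ha1, ha2, ha3, ha4, ha5, ha6, ha7, ha8⟩ := hrest
      rw [prune_stop a rest0 pvTokens 0 0
            (by intro t ht; fin_cases ht <;> simp <;> (intro h; subst h; simp_all))]
      simp [pvBest, pv2, ha1, ha2, ha3, ha4, ha5, ha6, ha7, ha8]

theorem pref2 (x y : Char) (L : List Char) :
    ([x, y].isPrefixOf L = true) = (L.take 2 = [x, y]) := by
  rw [eq_iff_iff, List.isPrefixOf_iff_prefix, List.prefix_iff_eq_take]
  simp [eq_comm]

theorem pref3 (x y z : Char) (L : List Char) :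
    ([x, y, z].isPrefixOf L = true) = (L.take 3 = [x, y, z]) := by
  rw [eq_iff_iff, List.isPrefixOf_iff_prefix, List.prefix_iff_eq_take]
  simp [eq_comm]

theorem main_eq (word : String) (index : Int) :
    parse_onset_py word index = parse_onset_py_alt word index := by
  unfold parse_onset_py parse_onset_py_alt
  set tail := PySem.Str.slice word (some index) none with htail
  have hLs : PySem.List.slice word.toList (some index) none = tail.toList := by
    rw [htail]; simp
  have h3 : (PySem.Str.slice tail none (some ((3 : Nat) : Int))).toList = tail.toList.take 3 := by
    simp [PySem.List.slice_to]
  have h2 : (PySem.Str.slice tail none (some ((2 : Nat) : Int))).toList = tail.toList.take 2 := by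
    simp [PySem.List.slice_to]
  simp only [onsetScan, onsetTokens, pyStartswithFrom, hLs]
  simp only [show ("sch" : String).toList = ['s','c','h'] from rfl,
    show ("ch" : String).toList = ['c','h'] from rfl,
    show ("sh" : String).toList = ['s','h'] from rfl,
    show ("th" : String).toList = ['t','h'] from rfl,
    show ("ph" : String).toList = ['p','h'] from rfl,
    show ("wh" : String).toList = ['w','h'] from rfl,
    show ("ng" : String).toList = ['n','g'] from rfl,
    show ("kk" : String).toList = ['k','k'] from rfl,
    show ("pp" : String).toList = ['p','p'] from rfl,
    show ("tt" : String).toList = ['t','t'] from rfl,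
    show ("ss" : String).toList = ['s','s'] from rfl,
    show ("jj" : String).toList = ['j','j'] from rfl,
    pref2, pref3]
  simp only [prune_spec]
  unfold pvBest
  by_cases q3 : tail.toList.take 3 = ['s','c','h']
  · simp [q3, str_eq_iff_toList, PySem.List.slice_to]
  · by_cases q2 : tail.toList.take 2 ∈ pv2
    · have q2' := q2
      simp only [pv2, List.mem_cons, List.not_mem_nil, or_false] at q2'
      rcases q2' with q|q|q|q|q|q|q|q|q|q|q <;>
        simp [q3, q, pv2, str_eq_iff_toList, PySem.List.slice_to]
    · have q2' := q2
      simp only [pv2, List.mem_cons, List.not_mem_nil, or_false, not_or] at q2'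
      obtain ⟨n1, n2, n3, n4, n5, n6, n7, n8, n9, n10, n11⟩ := q2'
      simp only [q3, q2, n1, n2, n3, n4, n5, n6, n7, n8, n9, n10, n11, if_false]
      simp only [ne_eq, not_true_eq_false, if_false]
      cases PySem.Str.pyGet? word index with
      | none => rfl
      | some ch =>
        show _ = _
        simp only []
        split_ifs <;> simp_all

-- ===== VERDICT (by name: the statement is the Claim_ definition above) =====
theorem parse_onset_py_spec : Claim_equal_parse_onset_py := by
  intro word index _ _
  exact main_eq word index
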